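-- pv_equiv track=rewrite | github.com/ChaehoonGwak/Self-study | Algorithm/EST_CT2.py | solution
-- ===== SOURCE A (Python) =====
-- from itertools import combinations
--
-- def solution(needs, r):
--     max_products = 0
--     robots = [i for i in range(len(needs[0]))]
--     combs = list(combinations(robots, r))
--
--     for comb in combs:
--         temp = 0
--
--         for need in needs:
--             flag = True
--             for idx, parts in enumerate(need):
--                 if parts == 1 and idx not in comb:
--                     flag = False
--                     break
--             if flag:
--                 temp += 1
--
--         max_products = max(max_products, temp)
--
--     return max_products
-- ===== SOURCE B (Python) =====
-- from itertools import combinations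
--
--
-- def _keys(n, r, need):
--     # all r-subsets of range(n), as sorted tuples, that contain every part the product needs
--     S = [i for i, p in enumerate(need) if p == 1]
--     if any(i >= n for i in S) or len(S) > r:
--         return []
--     sset = set(S)
--     others = [i for i in range(n) if i not in sset]
--     return [tuple(sorted(S + list(extra))) for extra in combinations(others, r - len(S))]
--
--
-- def solution(needs, r):
--     n = len(needs[0])
--     counter = {}
--     for need in needs:
--         for key in _keys(n, r, need):
--             counter[key] = counter.get(key, 0) + 1
--     return max(counter.values(), default=0)
-- ===== Notes on version B (the rewrite author's own statement) =====
-- stated objective: alternative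
-- what changed: Instead of testing every product against every r-combination (temp count per combination), B computes each product's required-part index set once and enumerates only the r-combinations that cover it, accumulating per-combination tallies in a dict; the answer is the maximum tally (default 0).
import Mathlib
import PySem

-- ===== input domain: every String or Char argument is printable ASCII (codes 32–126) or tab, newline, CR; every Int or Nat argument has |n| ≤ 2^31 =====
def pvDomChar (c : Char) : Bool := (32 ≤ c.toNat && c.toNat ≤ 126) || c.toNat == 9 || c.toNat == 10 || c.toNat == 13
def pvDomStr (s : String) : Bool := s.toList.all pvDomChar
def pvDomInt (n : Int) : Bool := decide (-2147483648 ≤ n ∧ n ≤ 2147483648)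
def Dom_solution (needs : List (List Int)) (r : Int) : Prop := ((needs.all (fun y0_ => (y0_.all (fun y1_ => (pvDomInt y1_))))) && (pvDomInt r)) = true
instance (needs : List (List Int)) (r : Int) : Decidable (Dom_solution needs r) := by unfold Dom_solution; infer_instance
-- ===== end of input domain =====

-- B gathers, per product, the exact set of r-part choices covering it into a counter dict,
-- instead of testing every product against every combination (alternative algorithm; equivalence of return values).

-- ===== PORT A =====
-- A's inner 'for idx, parts in enumerate(need): if parts == 1 and idx not in comb: flag = False; break'
def aFlag (comb : List Int) : Int → List Int → Bool
  | _, [] => true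
  | i, p :: rest => if p = 1 && !(comb.contains i) then false else aFlag comb (i + 1) rest

def solution (needs : List (List Int)) (r : Int) : Int :=
  let robots := PySem.List.pyRange 0 ((needs.headD []).length : Int) 1
  let combs := PySem.List.combinations robots r.toNat
  combs.foldl
    (fun max_products comb =>
      max max_products
        (needs.foldl (fun temp need => if aFlag comb 0 need then temp + 1 else temp) 0))
    0

-- ===== PORT B =====
-- B's '[i for i, p in enumerate(need) if p == 1]'
def bS : Int → List Int → List Int
  | _, [] => []
  | i, p :: rest => if p = 1 then i :: bS (i + 1) rest else bS (i + 1) rest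

-- B's '_keys(n, r, need)'
def bKeys (n : Nat) (r : Int) (need : List Int) : List (List Int) :=
  let S := bS 0 need
  if S.any (fun i => decide (i ≥ (n : Int))) || decide ((S.length : Int) > r) then []
  else
    let sset := PySem.Set.ofList S
    let others := (PySem.List.pyRange 0 (n : Int) 1).filter (fun i => !(sset.contains i))
    (PySem.List.combinations others (r - (S.length : Int)).toNat).map
      (fun extra => PySem.List.sorted (S ++ extra) (fun x => x) false)

def solution_alt (needs : List (List Int)) (r : Int) : Int :=
  let n := (needs.headD []).length
  let counter := needs.foldl
    (fun (d : PySem.Dict (List Int) Int) need =>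
      (bKeys n r need).foldl (fun d key => d.insert key (d.getD key 0 + 1)) d)
    PySem.Dict.empty
  PySem.List.maxD counter.values (fun v => v) 0

-- ===== PRECONDITION & SPEC =====
-- Pre_ excludes exactly the inputs where the Python A raises: empty needs (IndexError on
-- needs[0]) and negative r (ValueError from itertools.combinations).
def Pre_solution (needs : List (List Int)) (r : Int) : Prop := needs ≠ [] ∧ 0 ≤ r
instance (needs : List (List Int)) (r : Int) : Decidable (Pre_solution needs r) := by
  unfold Pre_solution; infer_instance

def pvWitness_solution : List (List Int) × Int := ([[1, 0], [0, 1]], 1)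

def Spec_solution (needs : List (List Int)) (r : Int) (out : Int) : Prop := out = solution_alt needs r
instance (needs : List (List Int)) (r : Int) (out : Int) : Decidable (Spec_solution needs r out) := by unfold Spec_solution; infer_instance

-- ===== CLAIM (what is proved, stated in full; the proofs are below) =====
def Claim_equal_solution : Prop := ∀ (needs : List (List Int)) (r : Int), Dom_solution needs r → Pre_solution needs r → Spec_solution needs r (solution needs r)

-- ===== LEMMAS AND PROOFS =====

-- elements produced by bS are ≥ the running index
lemma bS_lb (l : List Int) (i : Int) : ∀ s ∈ bS i l, i ≤ s := by
  induction l generalizing i with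
  | nil => simp [bS]
  | cons p rest ih =>
    intro s hs
    simp only [bS] at hs
    split at hs
    · rcases List.mem_cons.1 hs with h | h
      · omega
      · have := ih (i + 1) s h; omega
    · have := ih (i + 1) s hs; omega

lemma bS_sorted (l : List Int) (i : Int) : (bS i l).Pairwise (· < ·) := by
  induction l generalizing i with
  | nil => simp [bS]
  | cons p rest ih =>
    simp only [bS]
    split
    · exact List.pairwise_cons.2 ⟨fun s hs => by have := bS_lb rest (i + 1) s hs; omega, ih (i + 1)⟩
    · exact ih (i + 1)

-- A's flag loop is: every index required by the need lies in comb
lemma aFlag_eq (comb : List Int) (l : List Int) (i : Int) :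
    aFlag comb i l = (bS i l).all (fun s => comb.contains s) := by
  induction l generalizing i with
  | nil => simp [aFlag, bS]
  | cons p rest ih =>
    by_cases hp : p = 1
    · subst hp
      by_cases hm : i ∈ comb
      · simp [aFlag, bS, hm, ih]
      · simp [aFlag, bS, hm]
    · simp [aFlag, bS, hp, ih]

-- the combinations list of a duplicate-free pool has no duplicate entries
lemma combinations_nodup (pool : List Int) (k : Nat) (h : pool.Nodup) :
    (PySem.List.combinations pool k).Nodup := by
  induction pool generalizing k with
  | nil =>
    cases k with
    | zero => simp [PySem.List.combinations_zero]
    | succ k => simp [PySem.List.combinations_nil_succ]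
  | cons x t ih =>
    cases k with
    | zero => simp [PySem.List.combinations_zero]
    | succ k =>
      rw [PySem.List.combinations_cons_succ]
      have hx : x ∉ t := (List.nodup_cons.1 h).1
      have ht : t.Nodup := (List.nodup_cons.1 h).2
      refine List.Nodup.append ?_ (ih (k + 1) ht) ?_
      · refine List.Nodup.map ?_ (ih k ht)
        intro a b hab
        simpa using hab
      · intro c hc1 hc2
        rcases List.mem_map.1 hc1 with ⟨c', _, rfl⟩
        have hsub := PySem.List.sublist_of_mem_combinations hc2
        exact hx (hsub.subset (List.mem_cons_self))

-- strictly increasing lists: a subset of a strictly increasing list is a sublist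
lemma sublist_of_pairwise_lt_subset (pool : List Int) :
    ∀ (l : List Int), pool.Pairwise (· < ·) → l.Pairwise (· < ·) →
      (∀ x ∈ l, x ∈ pool) → l.Sublist pool := by
  induction pool with
  | nil =>
    intro l _ _ h
    cases l with
    | nil => simp
    | cons y t => exact absurd (h y List.mem_cons_self) (by simp)
  | cons x t ih =>
    intro l hp hl hsub
    cases l with
    | nil => exact List.nil_sublist _
    | cons y l' =>
      have hxt := (List.pairwise_cons.1 hp).1
      by_cases hyx : y = x
      · subst hyx
        refine List.Sublist.cons₂ _ (ih l' (List.pairwise_cons.1 hp).2 (List.pairwise_cons.1 hl).2 ?_)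
        intro z hz
        have hyz : y < z := (List.pairwise_cons.1 hl).1 z hz
        rcases List.mem_cons.1 (hsub z (List.mem_cons_of_mem _ hz)) with h | h
        · omega
        · exact h
      · refine List.Sublist.cons _ (ih (y :: l') (List.pairwise_cons.1 hp).2 hl ?_)
        have hyt : y ∈ t := by
          rcases List.mem_cons.1 (hsub y List.mem_cons_self) with h | h
          · exact absurd h hyx
          · exact h
        intro z hz
        rcases List.mem_cons.1 hz with rfl | hz'
        · exact hyt
        · have h1 : y < z := (List.pairwise_cons.1 hl).1 z hz'
          have h2 : x < y := hxt y hyt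
          rcases List.mem_cons.1 (hsub z hz) with h | h
          · omega
          · exact h

lemma pairwise_lt_of_le_nodup (l : List Int) (h1 : l.Pairwise (· ≤ ·)) (h2 : l.Nodup) :
    l.Pairwise (· < ·) :=
  (h1.and h2).imp (fun h => lt_of_le_of_ne h.1 h.2)

-- B's sorted-merge key list is a permutation of A's combination list filtered for covering S
lemma bkeys_perm (pool S : List Int) (k' : Nat)
    (hp : pool.Pairwise (· < ·)) (hs : S.Pairwise (· < ·)) (hsub : ∀ s ∈ S, s ∈ pool) :
    ((PySem.List.combinations
        (pool.filter (fun i => !((PySem.Set.ofList S).contains i))) k').map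
      (fun extra => PySem.List.sorted (S ++ extra) (fun x => x) false)).Perm
    ((PySem.List.combinations pool (S.length + k')).filter
      (fun c => S.all (fun s => c.contains s))) := by
  have hSnd : S.Nodup := hs.imp ne_of_lt
  have hPoolNd : pool.Nodup := hp.imp ne_of_lt
  have hOthersPair : (pool.filter (fun i => !((PySem.Set.ofList S).contains i))).Pairwise (· < ·) :=
    hp.filter _
  have hOthersNd : (pool.filter (fun i => !((PySem.Set.ofList S).contains i))).Nodup :=
    hOthersPair.imp ne_of_lt
  have hmemO : ∀ x : Int, x ∈ pool.filter (fun i => !((PySem.Set.ofList S).contains i))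
      ↔ x ∈ pool ∧ x ∉ S := by
    intro x
    simp [List.mem_filter, PySem.Set.mem_ofList]
  -- facts about the merge of one admissible extra
  have hmerge : ∀ extra, extra ∈ PySem.List.combinations
      (pool.filter (fun i => !((PySem.Set.ofList S).contains i))) k' →
      (PySem.List.sorted (S ++ extra) (fun x => x) false).Perm (S ++ extra)
      ∧ (S ++ extra).Nodup := by
    intro extra he
    have hsl := PySem.List.sublist_of_mem_combinations he
    have hnd : (S ++ extra).Nodup := by
      rw [List.nodup_append]
      refine ⟨hSnd, (List.Pairwise.sublist hsl hOthersPair).imp ne_of_lt, ?_⟩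
      intro a haS b hbE heq
      subst heq
      exact ((hmemO a).1 (hsl.subset hbE)).2 haS
    exact ⟨PySem.List.sorted_perm _ _ _, hnd⟩
  have hmem : ∀ c : List Int,
      c ∈ ((PySem.List.combinations
          (pool.filter (fun i => !((PySem.Set.ofList S).contains i))) k').map
        (fun extra => PySem.List.sorted (S ++ extra) (fun x => x) false))
      ↔ c ∈ ((PySem.List.combinations pool (S.length + k')).filter
          (fun c => S.all (fun s => c.contains s))) := by
    intro c
    constructor
    · intro hcm
      rcases List.mem_map.1 hcm with ⟨extra, he, rfl⟩
      have hsl := PySem.List.sublist_of_mem_combinations he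
      have hlen := PySem.List.length_of_mem_combinations he
      obtain ⟨hpm, hnd⟩ := hmerge extra he
      have hmnd : (PySem.List.sorted (S ++ extra) (fun x => x) false).Nodup :=
        (hpm.nodup_iff).2 hnd
      have hmlt : (PySem.List.sorted (S ++ extra) (fun x => x) false).Pairwise (· < ·) :=
        pairwise_lt_of_le_nodup _ (PySem.List.sorted_pairwise _ _) hmnd
      have hmsub : ∀ x ∈ PySem.List.sorted (S ++ extra) (fun x => x) false, x ∈ pool := by
        intro x hx
        rcases List.mem_append.1 (hpm.subset hx) with h | h
        · exact hsub x h
        · exact ((hmemO x).1 (hsl.subset h)).1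
      refine List.mem_filter.2 ⟨?_, ?_⟩
      · refine (PySem.List.mem_combinations_iff _ _ _).2
          ⟨sublist_of_pairwise_lt_subset pool _ hp hmlt hmsub, ?_⟩
        rw [PySem.List.length_sorted, List.length_append, hlen]
      · refine List.all_eq_true.2 ?_
        intro s hsm
        exact List.contains_iff_mem.2
          ((PySem.List.mem_sorted _ _ _ _).2 (List.mem_append.2 (Or.inl hsm)))
    · intro hcm
      obtain ⟨hc1, hc2⟩ := List.mem_filter.1 hcm
      have hcsl := PySem.List.sublist_of_mem_combinations hc1
      have hclen := PySem.List.length_of_mem_combinations hc1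
      have hclt : c.Pairwise (· < ·) := List.Pairwise.sublist hcsl hp
      have hScc : ∀ s ∈ S, s ∈ c := by
        intro s hsm
        exact List.contains_iff_mem.1 (List.all_eq_true.1 hc2 s hsm)
      have hfq : (c.filter (fun i => (PySem.Set.ofList S).contains i)).Perm S := by
        refine (List.perm_ext_iff_of_nodup
          (List.Nodup.filter _ (hclt.imp ne_of_lt)) hSnd).2 ?_
        intro a
        constructor
        · intro hmemf
          exact (PySem.Set.mem_ofList S a).1
            (List.contains_iff_mem.1 (List.mem_filter.1 hmemf).2)
        · intro haS
          exact List.mem_filter.2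
            ⟨hScc a haS, List.contains_iff_mem.2 ((PySem.Set.mem_ofList S a).2 haS)⟩
      have hcperm : c.Perm (S ++ c.filter (fun i => !((PySem.Set.ofList S).contains i))) := by
        refine ((List.filter_append_perm
          (fun i => (PySem.Set.ofList S).contains i) c).symm).trans ?_
        exact hfq.append (List.Perm.refl _)
      have hmerged : PySem.List.sorted
          (S ++ c.filter (fun i => !((PySem.Set.ofList S).contains i))) (fun x => x) false = c :=
        PySem.List.sorted_eq_of_perm_of_pairwise_lt _ _ _ hcperm hclt
      refine List.mem_map.2 ⟨c.filter (fun i => !((PySem.Set.ofList S).contains i)), ?_, hmerged⟩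
      refine (PySem.List.mem_combinations_iff _ _ _).2 ⟨hcsl.filter _, ?_⟩
      have := hcperm.length_eq
      rw [List.length_append] at this
      omega
  -- both sides are duplicate-free, so same membership gives a permutation
  have hLnd : ((PySem.List.combinations
      (pool.filter (fun i => !((PySem.Set.ofList S).contains i))) k').map
    (fun extra => PySem.List.sorted (S ++ extra) (fun x => x) false)).Nodup := by
    refine List.Nodup.map_on ?_ (combinations_nodup _ _ hOthersNd)
    intro e1 he1 e2 he2 heq
    obtain ⟨hpm1, -⟩ := hmerge e1 he1
    obtain ⟨hpm2, -⟩ := hmerge e2 he2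
    have hperm12 : (S ++ e1).Perm (S ++ e2) := (hpm1.symm.trans (heq ▸ hpm2))
    have he12 : e1.Perm e2 := (List.perm_append_left_iff S).1 hperm12
    have hp1 : e1.Pairwise (· < ·) :=
      List.Pairwise.sublist (PySem.List.sublist_of_mem_combinations he1) hOthersPair
    have hp2 : e2.Pairwise (· < ·) :=
      List.Pairwise.sublist (PySem.List.sublist_of_mem_combinations he2) hOthersPair
    exact PySem.List.eq_of_perm_of_pairwise_le_of_injective (fun x : Int => x)
      (fun a b h => h) he12 (hp1.imp le_of_lt) (hp2.imp le_of_lt)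
  have hRnd : ((PySem.List.combinations pool (S.length + k')).filter
      (fun c => S.all (fun s => c.contains s))).Nodup :=
    List.Nodup.filter _ (combinations_nodup _ _ hPoolNd)
  exact (List.perm_ext_iff_of_nodup hLnd hRnd).2 hmem

-- per-product key count: a combination is generated once for a product it covers, never otherwise
lemma count_bKeys (n : Nat) (r : Int) (hr : 0 ≤ r) (need c : List Int)
    (hc : c ∈ PySem.List.combinations (PySem.List.pyRange 0 (n : Int) 1) r.toNat) :
    List.count c (bKeys n r need) = if aFlag c 0 need then 1 else 0 := by
  have hcsub : ∀ y ∈ c, y ∈ PySem.List.pyRange 0 (n : Int) 1 :=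
    (PySem.List.sublist_of_mem_combinations hc).subset
  have hclen : c.length = r.toNat := PySem.List.length_of_mem_combinations hc
  have hflag := aFlag_eq c need 0
  unfold bKeys
  by_cases hguard :
      ((bS 0 need).any (fun i => decide (i ≥ (n : Int)))
        || decide (((bS 0 need).length : Int) > r)) = true
  · rw [if_pos hguard]
    have hfalse : aFlag c 0 need = false := by
      rw [hflag]
      rw [Bool.or_eq_true] at hguard
      rcases hguard with hbig | hlen
      · rcases List.any_eq_true.1 hbig with ⟨s, hsm, hsge⟩
        have hsge' : (n : Int) ≤ s := by simpa using hsge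
        apply Bool.eq_false_iff.2
        intro hall
        have : s ∈ c := by
          have := List.all_eq_true.1 hall s hsm
          exact List.contains_iff_mem.1 this
        have := (PySem.List.mem_pyRange_one.1 (hcsub s this)).2
        omega
      · have hlen' : ((bS 0 need).length : Int) > r := by simpa using hlen
        apply Bool.eq_false_iff.2
        intro hall
        have hsub : bS 0 need ⊆ c := by
          intro s hsm
          exact List.contains_iff_mem.1 (List.all_eq_true.1 hall s hsm)
        have hnd : (bS 0 need).Nodup := (bS_sorted need 0).nodup
        have := (hnd.subperm hsub).length_le
        have : ((bS 0 need).length : Int) ≤ (c.length : Int) := by exact_mod_cast this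
        rw [hclen] at this
        rw [Int.toNat_of_nonneg hr] at this
        omega
    simp [hfalse]
  · rw [if_neg hguard]
    have hnotany : ∀ s ∈ bS 0 need, s < (n : Int) := by
      intro s hsm
      by_contra hge
      apply hguard
      rw [Bool.or_eq_true]
      exact Or.inl (List.any_eq_true.2 ⟨s, hsm, by simpa using hge⟩)
    have hSsub : ∀ s ∈ bS 0 need, s ∈ PySem.List.pyRange 0 (n : Int) 1 := by
      intro s hsm
      exact PySem.List.mem_pyRange_one.2 ⟨by simpa using bS_lb need 0 s hsm, hnotany s hsm⟩
    have hkk : (bS 0 need).length + (r - ((bS 0 need).length : Int)).toNat = r.toNat := by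
      have hle : ¬(((bS 0 need).length : Int) > r) := by
        intro h
        apply hguard
        rw [Bool.or_eq_true]
        exact Or.inr (by simpa using h)
      omega
    rw [List.Perm.count_eq (bkeys_perm _ _ _
      (PySem.List.pairwise_lt_pyRange_one 0 (n : Int)) (bS_sorted need 0) hSsub) c]
    rw [hkk, hflag]
    by_cases hA : ((bS 0 need).all (fun s => c.contains s)) = true
    · rw [if_pos hA,
        List.count_filter (p := fun c' : List Int => (bS 0 need).all (fun s => c'.contains s)) hA]
      exact List.count_eq_one_of_mem
        (combinations_nodup _ _ (PySem.List.nodup_pyRange_one 0 (n : Int))) hc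
    · rw [if_neg hA, List.count_eq_zero.2]
      intro hmem
      exact hA (List.mem_filter.1 hmem).2

-- every generated key is one of A's combinations
lemma mem_bKeys (n : Nat) (r : Int) (need c : List Int) (hc : c ∈ bKeys n r need) :
    c ∈ PySem.List.combinations (PySem.List.pyRange 0 (n : Int) 1) r.toNat := by
  unfold bKeys at hc
  by_cases hguard :
      ((bS 0 need).any (fun i => decide (i ≥ (n : Int)))
        || decide (((bS 0 need).length : Int) > r)) = true
  · rw [if_pos hguard] at hc
    simp at hc
  · rw [if_neg hguard] at hc
    have hnotany : ∀ s ∈ bS 0 need, s < (n : Int) := by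
      intro s hsm
      by_contra hge
      apply hguard
      rw [Bool.or_eq_true]
      exact Or.inl (List.any_eq_true.2 ⟨s, hsm, by simpa using hge⟩)
    have hSsub : ∀ s ∈ bS 0 need, s ∈ PySem.List.pyRange 0 (n : Int) 1 := by
      intro s hsm
      exact PySem.List.mem_pyRange_one.2 ⟨by simpa using bS_lb need 0 s hsm, hnotany s hsm⟩
    have hkk : (bS 0 need).length + (r - ((bS 0 need).length : Int)).toNat = r.toNat := by
      have hle : ¬(((bS 0 need).length : Int) > r) := by
        intro h
        apply hguard
        rw [Bool.or_eq_true]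
        exact Or.inr (by simpa using h)
      omega
    have hc2 := (bkeys_perm _ _ _
      (PySem.List.pairwise_lt_pyRange_one 0 (n : Int)) (bS_sorted need 0) hSsub).mem_iff.1 hc
    rw [hkk] at hc2
    exact (List.mem_filter.1 hc2).1

-- key multiplicity across all products = A's per-combination product count
lemma count_flat_eq_countP (needs : List (List Int)) (n : Nat) (r : Int) (hr : 0 ≤ r)
    (c : List Int) (hc : c ∈ PySem.List.combinations (PySem.List.pyRange 0 (n : Int) 1) r.toNat) :
    List.count c (needs.flatMap (bKeys n r)) = needs.countP (fun need => aFlag c 0 need) := by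
  rw [List.count_flatMap]
  have hmap : needs.map (List.count c ∘ bKeys n r)
      = needs.map (fun need => if aFlag c 0 need then 1 else 0) :=
    List.map_congr_left (fun need _ => by
      simp only [Function.comp_apply]
      exact count_bKeys n r hr need c hc)
  rw [hmap]
  exact PySem.List.sum_map_ite_one_zero_nat _ needs

-- max(values, default=0) of a list of nonnegatives is the running max from 0
lemma maxD_eq_foldl_max (l : List Int) (h : ∀ v ∈ l, 0 ≤ v) :
    PySem.List.maxD l (fun v => v) 0 = l.foldl (fun m v => max m v) 0 := by
  cases l with
  | nil => rfl
  | cons x t =>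
    rw [PySem.List.maxD, PySem.List.max?_id_cons, Option.getD_some, List.foldl_cons]
    rw [max_eq_right (h x List.mem_cons_self)]

-- a running max is unchanged by entries whose value is 0, given a nonnegative accumulator
lemma foldl_max_zero {α : Type} (g : α → Int) (l : List α) (m : Int) (hm : 0 ≤ m)
    (h : ∀ c ∈ l, g c = 0) : l.foldl (fun m c => max m (g c)) m = m := by
  induction l generalizing m with
  | nil => rfl
  | cons x t ih =>
    rw [List.foldl_cons, h x List.mem_cons_self, max_eq_left hm]
    exact ih m hm (fun c hcm => h c (List.mem_cons_of_mem _ hcm))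

-- ===== VERDICT-PROOF =====
theorem solution_spec : Claim_equal_solution := by
  intro needs r _ hpre
  obtain ⟨-, hr⟩ := hpre
  unfold Spec_solution solution solution_alt
  simp only []
  set n := (needs.headD []).length with hn
  set L := needs.flatMap (bKeys n r) with hL
  set K := PySem.Set.ofList L with hK
  set combs := PySem.List.combinations (PySem.List.pyRange 0 (n : Int) 1) r.toNat with hcombs
  set aCnt := fun comb => needs.foldl
    (fun temp need => if aFlag comb 0 need then temp + 1 else temp) (0 : Int) with haCnt
  -- B's dict is Counter(L)
  have hcounter : needs.foldl
      (fun (d : PySem.Dict (List Int) Int) need =>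
        (bKeys n r need).foldl (fun d key => d.insert key (d.getD key 0 + 1)) d)
      PySem.Dict.empty = PySem.Dict.counter L := by
    rw [← List.foldl_flatMap, ← hL]
    exact PySem.Dict.foldl_insert_getD_add_one_eq_counter L
  have hvalues : (PySem.Dict.counter L).values
      = K.map (fun c => (List.count c L : Int)) := by
    simp [PySem.Dict.values, PySem.Dict.items_counter, List.map_map, Function.comp_def, hK]
  have hnodup : combs.Nodup :=
    combinations_nodup _ _ (PySem.List.nodup_pyRange_one 0 (n : Int))
  have hKcombs : ∀ c ∈ K, c ∈ combs := by
    intro c hcm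
    have hcl : c ∈ L := (PySem.Set.mem_ofList L c).1 hcm
    rw [hL] at hcl
    rcases List.mem_flatMap.1 hcl with ⟨need, -, hk⟩
    exact mem_bKeys n r need c hk
  have haCnt_eq : ∀ c ∈ combs, aCnt c = (List.count c L : Int) := by
    intro c hcm
    calc aCnt c = 0 + (needs.countP (fun need => aFlag c 0 need) : Int) :=
          PySem.List.foldl_count_if _ needs 0
      _ = (List.count c L : Int) := by
          rw [zero_add, hL, count_flat_eq_countP needs n r hr c hcm]
  have hperm_split := List.filter_append_perm (fun c => decide (c ∈ K)) combs
  have hfilter_perm : (combs.filter (fun c => decide (c ∈ K))).Perm K := by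
    refine (List.perm_ext_iff_of_nodup (List.Nodup.filter _ hnodup)
      (hK ▸ PySem.Set.nodup_ofList L)).2 ?_
    intro a
    constructor
    · intro ha
      have := List.mem_filter.1 ha
      simpa using this.2
    · intro ha
      exact List.mem_filter.2 ⟨hKcombs a ha, by simpa using ha⟩
  haveI rc : RightCommutative (fun (m : Int) (c : List Int) => max m (aCnt c)) :=
    ⟨fun b a a' => max_right_comm b (aCnt a) (aCnt a')⟩
  have h0le : (0 : Int) ≤ List.foldl (fun m c => max m (aCnt c)) 0
      (combs.filter (fun c => decide (c ∈ K))) :=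
    (PySem.List.le_foldl_max_int _ aCnt 0).1
  have hzero : ∀ c ∈ combs.filter (fun c => !(decide (c ∈ K))), aCnt c = 0 := by
    intro c hcm
    have h1 := List.mem_filter.1 hcm
    have hnotK : c ∉ K := by simpa using h1.2
    have hnotL : c ∉ L := fun h => hnotK (hK ▸ (PySem.Set.mem_ofList L c).2 h)
    rw [haCnt_eq c h1.1, List.count_eq_zero.2 hnotL]
    rfl
  have h0mem : ∀ v ∈ K.map (fun c => (List.count c L : Int)), 0 ≤ v := by
    intro v hv
    rcases List.mem_map.1 hv with ⟨c, -, rfl⟩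
    exact Int.natCast_nonneg _
  calc combs.foldl (fun m c => max m (aCnt c)) 0
      = (combs.filter (fun c => decide (c ∈ K))
          ++ combs.filter (fun c => !(decide (c ∈ K)))).foldl
            (fun m c => max m (aCnt c)) 0 := (hperm_split.foldl_eq 0).symm
    _ = (combs.filter (fun c => !(decide (c ∈ K)))).foldl (fun m c => max m (aCnt c))
          ((combs.filter (fun c => decide (c ∈ K))).foldl (fun m c => max m (aCnt c)) 0) :=
        List.foldl_append
    _ = (combs.filter (fun c => decide (c ∈ K))).foldl (fun m c => max m (aCnt c)) 0 :=
        foldl_max_zero aCnt _ _ h0le hzero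
    _ = K.foldl (fun m c => max m (aCnt c)) 0 := hfilter_perm.foldl_eq 0
    _ = K.foldl (fun m c => max m ((List.count c L : Int))) 0 :=
        PySem.List.foldl_congr_mem K _ _ 0
          (fun acc c hcm => by rw [haCnt_eq c (hKcombs c hcm)])
    _ = (K.map (fun c => (List.count c L : Int))).foldl (fun m v => max m v) 0 :=
        List.foldl_map.symm
    _ = PySem.List.maxD (K.map (fun c => (List.count c L : Int))) (fun v => v) 0 :=
        (maxD_eq_foldl_max _ h0mem).symm
    _ = PySem.List.maxD
          (needs.foldl (fun (d : PySem.Dict (List Int) Int) need =>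
            (bKeys n r need).foldl (fun d key => d.insert key (d.getD key 0 + 1)) d)
            PySem.Dict.empty).values (fun v => v) 0 := by rw [hcounter, hvalues]
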